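-- pv_equiv track=rewrite | github.com/CodingGuilhem/projet_comparaison_assemblage | Python_project/Third_try.py | find_scaffold_from_position
-- ===== SOURCE A (Python) =====
-- def find_scaffold_from_position(scaffold_dictionary : dict, absolute_position : int) -> int :
--     """
--     Function that find the scaffold that contains the absolute position given in argument
--     Input : dict : Dictionary of all the scaffolds , int : the absolute position you want
--     Output : int : The number of the scaffold that contains the absolute position
--     """
--     it = 1
--     position = 0
--     for scaffold in scaffold_dictionary.keys() :
--         position += len(scaffold)
--         if position > absolute_position :
--             return it
--
--         it += 1
-- ===== SOURCE B (Python) =====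
-- def find_scaffold_from_position(scaffold_dictionary: dict, absolute_position: int) -> int:
--     """Prefix-sum table + binary search instead of an early-exit scan."""
--     cumulative = []
--     total = 0
--     for scaffold in scaffold_dictionary.keys():
--         total += len(scaffold)
--         cumulative.append(total)
--     lo, hi = 0, len(cumulative)
--     while lo < hi:
--         mid = (lo + hi) // 2
--         if cumulative[mid] <= absolute_position:
--             lo = mid + 1
--         else:
--             hi = mid
--     return lo + 1 if lo < len(cumulative) else None
-- ===== Notes on version B (the rewrite author's own statement) =====
-- stated objective: alternative
-- what changed: Replaces A's early-exiting accumulate-and-compare scan with a cumulative-length prefix table probed by a hand-written binary search (bisect_right), returning None past the total length like A's fall-through.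
import Mathlib
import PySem

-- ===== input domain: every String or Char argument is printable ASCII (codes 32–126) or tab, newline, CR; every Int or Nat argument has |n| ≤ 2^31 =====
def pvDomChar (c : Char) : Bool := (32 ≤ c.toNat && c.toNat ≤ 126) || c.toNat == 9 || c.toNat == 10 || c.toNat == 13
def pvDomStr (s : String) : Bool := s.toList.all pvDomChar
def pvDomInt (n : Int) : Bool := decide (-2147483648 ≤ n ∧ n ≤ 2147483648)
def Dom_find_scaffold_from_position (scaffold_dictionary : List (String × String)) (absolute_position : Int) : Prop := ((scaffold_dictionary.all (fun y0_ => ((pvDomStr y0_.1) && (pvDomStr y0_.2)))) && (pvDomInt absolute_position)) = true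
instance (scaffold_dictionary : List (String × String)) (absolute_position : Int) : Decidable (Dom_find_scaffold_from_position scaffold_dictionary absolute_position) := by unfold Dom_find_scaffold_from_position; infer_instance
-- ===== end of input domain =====

-- B replaces A's early-exiting accumulate-and-compare scan with a prefix-sum table probed by
-- binary search; equality of return values is proved on all inputs (A is total).

-- ===== PORT A =====
-- the for-loop over the dict's keys, carrying `it` and `position`
def pvALoop (keys : List String) (it position absolute_position : Int) : Option Int :=
  match keys with
  | [] => none
  | scaffold :: rest =>
    let position := position + PySem.Str.len scaffold
    if position > absolute_position then some it
    else pvALoop rest (it + 1) position absolute_position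

def find_scaffold_from_position (scaffold_dictionary : List (String × String)) (absolute_position : Int) : Option Int :=
  pvALoop (PySem.Dict.ofList scaffold_dictionary).keys 1 0 absolute_position

-- ===== PORT B =====
-- the cumulative-table building loop of Source B
def pvBuildCum (keys : List String) (total : Int) (cumulative : List Int) : Int × List Int :=
  match keys with
  | [] => (total, cumulative)
  | scaffold :: rest =>
    let total := total + PySem.Str.len scaffold
    pvBuildCum rest total (cumulative ++ [total])

-- the while-loop binary search of Source B
def pvBSearch (cumulative : List Int) (target : Int) (lo hi : Nat) : Nat :=
  if _h : lo < hi then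
    let mid := (lo + hi) / 2
    if (PySem.List.pyGet? cumulative (mid : Int)).getD 0 ≤ target then
      pvBSearch cumulative target (mid + 1) hi
    else
      pvBSearch cumulative target lo mid
  else lo
termination_by hi - lo
decreasing_by all_goals omega

def find_scaffold_from_position_alt (scaffold_dictionary : List (String × String)) (absolute_position : Int) : Option Int :=
  let cumulative := (pvBuildCum (PySem.Dict.ofList scaffold_dictionary).keys 0 []).2
  let lo := pvBSearch cumulative absolute_position 0 cumulative.length
  if lo < cumulative.length then some ((lo : Int) + 1) else none

-- ===== PRECONDITION & SPEC =====
def Spec_find_scaffold_from_position (scaffold_dictionary : List (String × String)) (absolute_position : Int) (out : Option Int) : Prop := out = find_scaffold_from_position_alt scaffold_dictionary absolute_position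
instance (scaffold_dictionary : List (String × String)) (absolute_position : Int) (out : Option Int) : Decidable (Spec_find_scaffold_from_position scaffold_dictionary absolute_position out) := by unfold Spec_find_scaffold_from_position; infer_instance

-- ===== CLAIM (what is proved, stated in full; the proofs are below) =====
def Claim_equal_find_scaffold_from_position : Prop := ∀ (scaffold_dictionary : List (String × String)) (absolute_position : Int), Dom_find_scaffold_from_position scaffold_dictionary absolute_position → Spec_find_scaffold_from_position scaffold_dictionary absolute_position (find_scaffold_from_position scaffold_dictionary absolute_position)

-- ===== LEMMAS AND PROOFS =====

-- specification-side cumulative sums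
def pvCums : List String → Int → List Int
  | [], _ => []
  | k :: ks, t => (t + PySem.Str.len k) :: pvCums ks (t + PySem.Str.len k)

-- first index whose cumulative sum exceeds the position
def pvFirst (pos : Int) : List Int → Option Nat
  | [] => none
  | x :: xs => if pos < x then some 0 else (pvFirst pos xs).map (· + 1)

lemma pvBuildCum_eq (ks : List String) : ∀ (t : Int) (acc : List Int),
    (pvBuildCum ks t acc).2 = acc ++ pvCums ks t := by
  induction ks with
  | nil => simp [pvBuildCum, pvCums]
  | cons k rest ih =>
    intro t acc
    simp [pvBuildCum, pvCums, ih]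

lemma pvALoop_eq (pos : Int) (ks : List String) : ∀ (it t : Int),
    pvALoop ks it t pos = (pvFirst pos (pvCums ks t)).map (fun i : Nat => it + (i : Int)) := by
  induction ks with
  | nil => intro it t; simp [pvALoop, pvCums, pvFirst]
  | cons k rest ih =>
    intro it t
    show (if t + PySem.Str.len k > pos then some it
          else pvALoop rest (it + 1) (t + PySem.Str.len k) pos)
        = (pvFirst pos ((t + PySem.Str.len k) :: pvCums rest (t + PySem.Str.len k))).map
            (fun i : Nat => it + (i : Int))
    rw [pvFirst]
    by_cases h : pos < t + PySem.Str.len k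
    · rw [if_pos (by exact h), if_pos h, Option.map_some]
      norm_num
    · rw [if_neg (by exact h), if_neg h, ih (it + 1) (t + PySem.Str.len k), Option.map_map]
      congr 1
      funext i
      simp only [Function.comp]
      push_cast
      ring

lemma pvCums_lb (ks : List String) : ∀ (t : Int), ∀ x ∈ pvCums ks t, t ≤ x := by
  induction ks with
  | nil => simp [pvCums]
  | cons k rest ih =>
    intro t x hx
    have hlen : (0 : Int) ≤ PySem.Str.len k := by
      rw [PySem.Str.len_eq]; positivity
    simp only [pvCums, List.mem_cons] at hx
    rcases hx with h | h
    · omega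
    · have := ih (t + PySem.Str.len k) x h; omega

lemma pvCums_pairwise (ks : List String) : ∀ (t : Int), (pvCums ks t).Pairwise (· ≤ ·) := by
  induction ks with
  | nil => simp [pvCums]
  | cons k rest ih =>
    intro t
    simp only [pvCums, List.pairwise_cons]
    exact ⟨fun x hx => pvCums_lb rest _ x hx, ih _⟩

lemma pvFirst_some (pos : Int) : ∀ (l : List Int) (i : Nat), pvFirst pos l = some i →
    ∃ h : i < l.length, pos < l[i] ∧ ∀ j (hj : j < l.length), j < i → l[j] ≤ pos := by
  intro l
  induction l with
  | nil => intro i h; simp [pvFirst] at h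
  | cons x xs ih =>
    intro i hi
    rw [pvFirst] at hi
    by_cases h : pos < x
    · rw [if_pos h] at hi
      injection hi with hi0
      subst hi0
      exact ⟨by simp, by simpa using h, by omega⟩
    · rw [if_neg h] at hi
      rcases Option.map_eq_some_iff.mp hi with ⟨i', hi', rfl⟩
      obtain ⟨hl, hx, hprev⟩ := ih i' hi'
      refine ⟨by simp; omega, by simpa using hx, ?_⟩
      intro j hj hji
      cases j with
      | zero => simpa using not_lt.mp h
      | succ j' =>
        have hj' : j' < xs.length := by simp at hj; omega
        simpa using hprev j' hj' (by omega)

lemma pvFirst_none (pos : Int) : ∀ (l : List Int), pvFirst pos l = none →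
    ∀ j (hj : j < l.length), l[j] ≤ pos := by
  intro l
  induction l with
  | nil => simp
  | cons x xs ih =>
    intro hn j hj
    rw [pvFirst] at hn
    by_cases h : pos < x
    · rw [if_pos h] at hn; exact absurd hn (by simp)
    · rw [if_neg h, Option.map_eq_none_iff] at hn
      cases j with
      | zero => simpa using not_lt.mp h
      | succ j' =>
        have hj' : j' < xs.length := by simp at hj; omega
        simpa using ih hn j' hj'

lemma pvBSearch_eq (l : List Int) (pos : Int) (lo hi : Nat) :
    pvBSearch l pos lo hi =
      if lo < hi then
        (if (PySem.List.pyGet? l (((lo + hi) / 2 : Nat) : Int)).getD 0 ≤ pos then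
          pvBSearch l pos ((lo + hi) / 2 + 1) hi
        else pvBSearch l pos lo ((lo + hi) / 2))
      else lo := by
  rw [pvBSearch]
  by_cases h : lo < hi <;> simp [h]

lemma pvBSearch_inv (l : List Int) (pos : Int) (hpw : l.Pairwise (· ≤ ·)) :
    ∀ (n lo hi : Nat), hi - lo ≤ n → lo ≤ hi → hi ≤ l.length →
    (∀ j (hj : j < l.length), j < lo → l[j] ≤ pos) →
    (∀ j (hj : j < l.length), hi ≤ j → pos < l[j]) →
    (∀ j (hj : j < l.length), j < pvBSearch l pos lo hi → l[j] ≤ pos) ∧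
    (∀ h : pvBSearch l pos lo hi < l.length, pos < l[pvBSearch l pos lo hi]) ∧
    pvBSearch l pos lo hi ≤ l.length := by
  have hmono : ∀ i j (hj : j < l.length) (hij : i ≤ j), l[i]'(by omega) ≤ l[j] := by
    intro i j hj hij
    rcases Nat.lt_or_ge i j with h | h
    · exact List.pairwise_iff_getElem.mp hpw i j (by omega) hj h
    · have : i = j := by omega
      subst this; exact le_refl _
  intro n
  induction n with
  | zero =>
    intro lo hi hfuel hlh hhi hlo hhiP
    have h1 : ¬ lo < hi := by omega
    rw [pvBSearch_eq, if_neg h1]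
    exact ⟨hlo, fun h => hhiP lo h (by omega), by omega⟩
  | succ n ih =>
    intro lo hi hfuel hlh hhi hlo hhiP
    by_cases h1 : lo < hi
    · have hmlo : lo ≤ (lo + hi) / 2 := by omega
      have hmhi : (lo + hi) / 2 < hi := by omega
      have hmid : (lo + hi) / 2 < l.length := by omega
      have hmidv : (PySem.List.pyGet? l (((lo + hi) / 2 : Nat) : Int)).getD 0 = l[(lo + hi) / 2] := by
        rw [PySem.List.pyGet?_natCast, List.getElem?_eq_getElem hmid, Option.getD_some]
      rw [pvBSearch_eq, if_pos h1, hmidv]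
      by_cases h2 : l[(lo + hi) / 2] ≤ pos
      · rw [if_pos h2]
        exact ih ((lo + hi) / 2 + 1) hi (by omega) (by omega) hhi
          (fun j hj hjlo => le_trans (hmono j ((lo + hi) / 2) hmid (by omega)) h2) hhiP
      · rw [if_neg h2]
        exact ih lo ((lo + hi) / 2) (by omega) (by omega) (by omega) hlo
          (fun j hj hjm => lt_of_lt_of_le (not_le.mp h2) (hmono ((lo + hi) / 2) j hj hjm))
    · rw [pvBSearch_eq, if_neg h1]
      exact ⟨hlo, fun h => hhiP lo h (by omega), by omega⟩

-- ===== VERDICT (by name: the statement is the Claim_ definition above) =====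
theorem find_scaffold_from_position_spec : Claim_equal_find_scaffold_from_position := by
  intro d pos _
  unfold Spec_find_scaffold_from_position find_scaffold_from_position find_scaffold_from_position_alt
  set ks := (PySem.Dict.ofList d).keys with hks
  rw [pvBuildCum_eq ks 0 []]
  simp only [List.nil_append]
  set l := pvCums ks 0 with hl
  rw [pvALoop_eq pos ks 1 0, ← hl]
  obtain ⟨hbelow, habove, hle⟩ := pvBSearch_inv l pos (pvCums_pairwise ks 0) l.length 0 l.length
    (by omega) (by omega) (le_refl _) (by omega) (by omega)
  set r := pvBSearch l pos 0 l.length with hr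
  cases hF : pvFirst pos l with
  | none =>
    have hall := pvFirst_none pos l hF
    have : ¬ r < l.length := fun h => absurd (habove h) (not_lt.mpr (hall r h))
    simp [this]
  | some i =>
    obtain ⟨hil, hxi, hprev⟩ := pvFirst_some pos l i hF
    have hri : r = i := by
      rcases Nat.lt_trichotomy r i with h | h | h
      · exact absurd (habove (by omega)) (not_lt.mpr (hprev r (by omega) h))
      · exact h
      · exact absurd hxi (not_lt.mpr (hbelow i hil h))
    have hrlen : r < l.length := by omega
    rw [if_pos hrlen, hri]
    simp only [Option.map_some]
    congr 1
    push_cast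
    ring
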